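-- pv_equiv track=rewrite | github.com/Quasar4606/Dependency-tree-structure | tree_gen.py | make_directed_tree
-- ===== SOURCE A (Python) =====
-- from collections import defaultdict
--
-- def make_directed_tree(edges, root):
--     # Build adjacency list from undirected edges
--     adj = defaultdict(list)
--     for u, v in edges:
--         adj[u].append(v)
--         adj[v].append(u)
--
--     directed_children = defaultdict(list)
--     visited = set()
--
--     # Depth-first search to direct edges away from root
--     def dfs(node):
--         visited.add(node)
--         for neighbour in adj[node]:
--             if neighbour not in visited:
--                 directed_children[node].append(neighbour)
--                 dfs(neighbour)
--
--     dfs(root)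
--     return directed_children
-- ===== SOURCE B (Python) =====
-- def make_directed_tree(edges, root):
--     # Build adjacency list from undirected edges
--     adj = {}
--     for u, v in edges:
--         adj.setdefault(u, []).append(v)
--         adj.setdefault(v, []).append(u)
--
--     # Iterative depth-first search with an explicit stack of
--     # (node, iterator over its neighbours), directing edges away from root.
--     directed_children = {}
--     visited = {root}
--     stack = [(root, iter(adj.get(root, ())))]
--     while stack:
--         node, it = stack[-1]
--         for n in it:
--             if n not in visited:
--                 visited.add(n)
--                 directed_children.setdefault(node, []).append(n)
--                 stack.append((n, iter(adj.get(n, ()))))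
--                 break
--         else:
--             stack.pop()
--     return directed_children
-- ===== Notes on version B (the rewrite author's own statement) =====
-- stated objective: alternative
-- what changed: The recursive depth-first search (with mutated closure state) is replaced by an iterative DFS that drives an explicit stack of (node, neighbour-iterator) pairs, preserving the exact pre-order visit and per-node child order; the dicts are built with setdefault instead of defaultdict.
import Mathlib
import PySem

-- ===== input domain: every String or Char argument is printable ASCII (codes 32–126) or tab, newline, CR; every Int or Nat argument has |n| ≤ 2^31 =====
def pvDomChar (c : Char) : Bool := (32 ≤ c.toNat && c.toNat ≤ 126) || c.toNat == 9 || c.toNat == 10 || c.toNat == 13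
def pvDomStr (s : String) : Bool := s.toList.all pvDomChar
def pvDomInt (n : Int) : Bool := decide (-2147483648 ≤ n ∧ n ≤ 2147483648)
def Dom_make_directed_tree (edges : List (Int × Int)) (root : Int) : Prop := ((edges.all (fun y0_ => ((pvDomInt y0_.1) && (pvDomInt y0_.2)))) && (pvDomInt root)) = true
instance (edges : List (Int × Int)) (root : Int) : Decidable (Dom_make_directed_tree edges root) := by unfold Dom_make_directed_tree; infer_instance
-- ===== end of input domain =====

-- B replaces A's recursive DFS by an explicit-stack iterative DFS with the same
-- visit order; equal output (the returned dict) is proved on all inputs.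

-- ===== PORT A =====
-- shared helper: the adjacency list built from the undirected edges
def pvAdj (edges : List (Int × Int)) : PySem.Dict Int (List Int) :=
  edges.foldl
    (fun d p => (d.modify p.1 [] (· ++ [p.2])).modify p.2 [] (· ++ [p.1]))
    PySem.Dict.empty

-- state of the search: (visited set, directed_children dict)
-- A's recursive dfs; `fuel` (threaded through the recursion) is only a
-- termination device — the top-level call supplies enough for it never to run out.
def pvVisitA (adj : PySem.Dict Int (List Int)) (fuel : Nat) (node : Int)
    (ns : List Int) (st : PySem.Set Int × PySem.Dict Int (List Int)) :
    Nat × (PySem.Set Int × PySem.Dict Int (List Int)) :=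
  match fuel, ns with
  | 0, _ => (0, st)
  | f + 1, [] => (f, st)
  | f + 1, n :: rest =>
    if PySem.Set.contains st.1 n then
      pvVisitA adj f node rest st
    else
      pvVisitA adj
        (min (pvVisitA adj f n (adj.getD n [])
          (PySem.Set.add st.1 n, st.2.modify node [] (· ++ [n]))).1 f)
        node rest
        (pvVisitA adj f n (adj.getD n [])
          (PySem.Set.add st.1 n, st.2.modify node [] (· ++ [n]))).2
termination_by fuel
decreasing_by
  · exact Nat.lt_succ_self f
  · exact Nat.lt_succ_self f
  · exact Nat.lt_succ_of_le (Nat.min_le_right _ _)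

def make_directed_tree (edges : List (Int × Int)) (root : Int) : List (Int × List Int) :=
  ((pvVisitA (pvAdj edges) (4 * edges.length + 2) root ((pvAdj edges).getD root [])
      (PySem.Set.add PySem.Set.empty root, PySem.Dict.empty)).2).2.items

-- ===== PORT B =====
-- B's while loop: stack of (node, remaining neighbours of its iterator);
-- `fuel` decreases once per neighbour/pop step, again only a termination device.
def pvLoopB (adj : PySem.Dict Int (List Int)) (fuel : Nat)
    (stack : List (Int × List Int)) (st : PySem.Set Int × PySem.Dict Int (List Int)) :
    PySem.Set Int × PySem.Dict Int (List Int) :=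
  match fuel, stack with
  | 0, _ => st
  | _ + 1, [] => st
  | f + 1, (_, []) :: stk => pvLoopB adj f stk st
  | f + 1, (node, n :: rest) :: stk =>
    if PySem.Set.contains st.1 n then
      pvLoopB adj f ((node, rest) :: stk) st
    else
      pvLoopB adj f ((n, adj.getD n []) :: (node, rest) :: stk)
        (PySem.Set.add st.1 n, st.2.modify node [] (· ++ [n]))

def make_directed_tree_alt (edges : List (Int × Int)) (root : Int) : List (Int × List Int) :=
  (pvLoopB (pvAdj edges) (4 * edges.length + 2) [(root, (pvAdj edges).getD root [])]
      (PySem.Set.add PySem.Set.empty root, PySem.Dict.empty)).2.items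

-- ===== PRECONDITION & SPEC =====
def Spec_make_directed_tree (edges : List (Int × Int)) (root : Int) (out : List (Int × List Int)) : Prop := out = make_directed_tree_alt edges root
instance (edges : List (Int × Int)) (root : Int) (out : List (Int × List Int)) : Decidable (Spec_make_directed_tree edges root out) := by unfold Spec_make_directed_tree; infer_instance

-- ===== CLAIM (what is proved, stated in full; the proofs are below) =====
def Claim_equal_make_directed_tree : Prop := ∀ (edges : List (Int × Int)) (root : Int), Dom_make_directed_tree edges root → Spec_make_directed_tree edges root (make_directed_tree edges root)

-- ===== LEMMAS AND PROOFS =====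

-- the fuel returned by pvVisitA never exceeds the fuel supplied
lemma pvVisitA_fuel_le (adj : PySem.Dict Int (List Int)) :
    ∀ (f : Nat) (node : Int) (ns : List Int)
      (st : PySem.Set Int × PySem.Dict Int (List Int)),
      (pvVisitA adj f node ns st).1 ≤ f := by
  intro f
  induction f using Nat.strong_induction_on with
  | _ f ih =>
    intro node ns st
    match f, ns with
    | 0, ns => simp [pvVisitA]
    | f + 1, [] => simp [pvVisitA]
    | f + 1, n :: rest =>
      rw [pvVisitA]
      split_ifs with h
      · exact le_trans (ih f (by omega) node rest st) (by omega)
      · have h2 := ih (min (pvVisitA adj f n (adj.getD n [])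
          (PySem.Set.add st.1 n, st.2.modify node [] (· ++ [n]))).1 f)
          (by omega) node rest
          (pvVisitA adj f n (adj.getD n [])
            (PySem.Set.add st.1 n, st.2.modify node [] (· ++ [n]))).2
        omega

lemma pvLoopB_nil (adj : PySem.Dict Int (List Int)) (f : Nat)
    (st : PySem.Set Int × PySem.Dict Int (List Int)) :
    pvLoopB adj f [] st = st := by
  cases f <;> rfl

-- step alignment: running B's loop with (node, ns) on top of the stack first
-- performs exactly A's iteration over ns (same fuel discipline), then continues
-- with the rest of the stack.
lemma pvLoopB_step (adj : PySem.Dict Int (List Int)) :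
    ∀ (f : Nat) (node : Int) (ns : List Int) (stk : List (Int × List Int))
      (st : PySem.Set Int × PySem.Dict Int (List Int)),
      pvLoopB adj f ((node, ns) :: stk) st =
        pvLoopB adj (pvVisitA adj f node ns st).1 stk (pvVisitA adj f node ns st).2 := by
  intro f
  induction f using Nat.strong_induction_on with
  | _ f ih =>
    intro node ns stk st
    match f, ns with
    | 0, ns => simp [pvVisitA, pvLoopB]
    | f + 1, [] => simp [pvVisitA, pvLoopB]
    | f + 1, n :: rest =>
      rw [pvVisitA, pvLoopB]
      split_ifs with h
      · exact ih f (by omega) node rest stk st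
      · have hple := pvVisitA_fuel_le adj f n (adj.getD n [])
          (PySem.Set.add st.1 n, st.2.modify node [] (· ++ [n]))
        have hmin : min (pvVisitA adj f n (adj.getD n [])
            (PySem.Set.add st.1 n, st.2.modify node [] (· ++ [n]))).1 f
            = (pvVisitA adj f n (adj.getD n [])
            (PySem.Set.add st.1 n, st.2.modify node [] (· ++ [n]))).1 := by omega
        rw [ih f (by omega) n (adj.getD n []) ((node, rest) :: stk)
          (PySem.Set.add st.1 n, st.2.modify node [] (· ++ [n]))]
        rw [ih _ (by omega : (pvVisitA adj f n (adj.getD n [])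
            (PySem.Set.add st.1 n, st.2.modify node [] (· ++ [n]))).1 < f + 1)
          node rest stk _, hmin]

-- ===== VERDICT (by name: the statement is the Claim_ definition above) =====
theorem make_directed_tree_spec : Claim_equal_make_directed_tree := by
  intro edges root _
  unfold Spec_make_directed_tree make_directed_tree make_directed_tree_alt
  rw [pvLoopB_step, pvLoopB_nil]
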